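-- pv_equiv track=rewrite | github.com/greengreengreen/data_structure_n_algos | binary_search/binary_search_basic.py | binary_search_var7
-- ===== SOURCE A (Python) =====
-- import math
--
-- def binary_search_var7(arr, target):
--     # 7. Given a descreasingly sorted array, return the last index which has value > target.
--     n = len(arr)
--     l, r = -1, n-1
--     while l < r:
--         m = l + math.ceil((r-l)/2)
--         if arr[m] > target: l = m
--         else: r = m - 1
--     return r if r >= 0 and arr[r] > target else -1
-- ===== SOURCE B (Python) =====
-- def binary_search_var7(arr, target):
--     # Recursive re-expression of the same search: window (l, r],
--     # identical upper-middle pivot written in integer arithmetic.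
--     def go(l, r):
--         if l >= r:
--             return r if r >= 0 and arr[r] > target else -1
--         m = (l + r + 1) // 2
--         return go(m, r) if arr[m] > target else go(l, m - 1)
--     return go(-1, len(arr) - 1)
-- ===== Notes on version B (the rewrite author's own statement) =====
-- stated objective: alternative
-- what changed: The while loop over mutable (l, r) with a float-based pivot l + math.ceil((r-l)/2) is replaced by a recursive helper on the window that uses the pure integer pivot (l+r+1)//2 and returns the answer directly at the base case.
import Mathlib
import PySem

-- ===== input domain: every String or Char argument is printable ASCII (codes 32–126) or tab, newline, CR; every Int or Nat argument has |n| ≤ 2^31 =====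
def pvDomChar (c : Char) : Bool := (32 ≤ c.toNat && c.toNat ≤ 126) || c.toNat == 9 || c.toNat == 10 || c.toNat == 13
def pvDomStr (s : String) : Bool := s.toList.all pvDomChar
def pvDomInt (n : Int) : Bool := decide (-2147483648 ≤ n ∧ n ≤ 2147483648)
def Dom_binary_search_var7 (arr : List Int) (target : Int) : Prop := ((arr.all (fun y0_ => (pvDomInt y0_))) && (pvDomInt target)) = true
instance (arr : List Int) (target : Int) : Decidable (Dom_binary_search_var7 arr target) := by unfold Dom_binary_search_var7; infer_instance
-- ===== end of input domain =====

-- B replaces A's while loop (float pivot l + math.ceil((r-l)/2)) by a recursive helper on the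
-- window with the pure integer pivot (l+r+1)//2; same values, no speed claim (objective: alternative).

-- ===== PORT A =====
-- the while loop; fuel is a port artifact (arr.length iterations always suffice, proved below)
def bsLoopA (arr : List Int) (target : Int) : Nat → Int → Int → Int × Int
  | 0, l, r => (l, r)
  | fuel + 1, l, r =>
    if l < r then
      -- math.ceil((r-l)/2) on ints is exactly (r-l+1)//2 (float division is exact at these sizes)
      let m := l + PySem.Int.floordiv (r - l + 1) 2
      if PySem.List.pyGetD arr m 0 > target then bsLoopA arr target fuel m r
      else bsLoopA arr target fuel l (m - 1)
    else (l, r)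

def binary_search_var7 (arr : List Int) (target : Int) : Int :=
  let n : Int := arr.length
  let p := bsLoopA arr target arr.length (-1) (n - 1)
  if p.2 ≥ 0 ∧ PySem.List.pyGetD arr p.2 0 > target then p.2 else -1

-- ===== PORT B =====
-- recursion on the (l, r] window; gas is a port artifact (the Python recursion terminates
-- because the window shrinks; gas = arr.length always suffices, as the proof below shows —
-- when gas runs out l ≥ r already holds and the base case is the Python base case)
def bsGoB (arr : List Int) (target : Int) : Nat → Int → Int → Int
  | 0, _, r => if r ≥ 0 ∧ PySem.List.pyGetD arr r 0 > target then r else -1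
  | gas + 1, l, r =>
    if l < r then
      let m := PySem.Int.floordiv (l + r + 1) 2
      if PySem.List.pyGetD arr m 0 > target then bsGoB arr target gas m r
      else bsGoB arr target gas l (m - 1)
    else
      if r ≥ 0 ∧ PySem.List.pyGetD arr r 0 > target then r else -1

def binary_search_var7_alt (arr : List Int) (target : Int) : Int :=
  bsGoB arr target arr.length (-1) ((arr.length : Int) - 1)

-- ===== PRECONDITION & SPEC =====
def Spec_binary_search_var7 (arr : List Int) (target : Int) (out : Int) : Prop := out = binary_search_var7_alt arr target
instance (arr : List Int) (target : Int) (out : Int) : Decidable (Spec_binary_search_var7 arr target out) := by unfold Spec_binary_search_var7; infer_instance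

-- ===== CLAIM (what is proved, stated in full; the proofs are below) =====
def Claim_equal_binary_search_var7 : Prop := ∀ (arr : List Int) (target : Int), Dom_binary_search_var7 arr target → Spec_binary_search_var7 arr target (binary_search_var7 arr target)

-- ===== LEMMAS AND PROOFS =====

-- B's recursion equals A's loop followed by A's final guard, for any sufficient fuel/gas
lemma bsGoB_eq_loopA (arr : List Int) (target : Int) :
    ∀ (fuel : Nat) (l r : Int), (r - l).toNat ≤ fuel →
      bsGoB arr target fuel l r =
        (if (bsLoopA arr target fuel l r).2 ≥ 0 ∧
            PySem.List.pyGetD arr (bsLoopA arr target fuel l r).2 0 > target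
         then (bsLoopA arr target fuel l r).2 else -1) := by
  intro fuel
  induction fuel with
  | zero =>
    intro l r hfuel
    simp [bsGoB, bsLoopA]
  | succ fuel ih =>
    intro l r hfuel
    by_cases hlr : l < r
    · have hdiv1 := PySem.Int.floordiv_eq_ediv_of_pos (a := l + r + 1) (b := 2) (by omega)
      have hdiv2 := PySem.Int.floordiv_eq_ediv_of_pos (a := r - l + 1) (b := 2) (by omega)
      have hm : PySem.Int.floordiv (l + r + 1) 2 = l + PySem.Int.floordiv (r - l + 1) 2 := by
        rw [hdiv1, hdiv2]; omega
      have hlo : l < PySem.Int.floordiv (l + r + 1) 2 := by rw [hdiv1]; omega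
      have hhi : PySem.Int.floordiv (l + r + 1) 2 ≤ r := by rw [hdiv1]; omega
      simp only [bsGoB, bsLoopA, if_pos hlr, ← hm]
      by_cases hcmp : PySem.List.pyGetD arr (PySem.Int.floordiv (l + r + 1) 2) 0 > target
      · simp only [if_pos hcmp]
        exact ih _ _ (by omega)
      · simp only [if_neg hcmp]
        exact ih _ _ (by omega)
    · simp [bsGoB, bsLoopA, hlr]

-- ===== VERDICT (by name: the statement is the Claim_ definition above) =====
theorem binary_search_var7_spec : Claim_equal_binary_search_var7 := by
  intro arr target _
  unfold Spec_binary_search_var7 binary_search_var7 binary_search_var7_alt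
  exact (bsGoB_eq_loopA arr target arr.length (-1) ((arr.length : Int) - 1) (by omega)).symm
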